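-- pv_equiv track=rewrite | github.com/we-and/python_script_parser | script_parser.py | map_semi_duplicates
-- ===== SOURCE A (Python) =====
-- def map_semi_duplicates(names):
--     normalized_map = {}  # Maps normalized names to their first occurrence
--     duplicates = {}  # Stores mappings of semi-duplicate entries
--
--     for name in names:
--         normalized = name.replace(" ", "")  # Remove spaces to normalize
--         if normalized in normalized_map:
--             # Map current name to the first occurrence of this normalized form
--             duplicates[name] = normalized_map[normalized]
--         else:
--             # Store the first occurrence of this normalized form
--             normalized_map[normalized] = name
--
--     return duplicates
-- ===== SOURCE B (Python) =====
-- def map_semi_duplicates(names):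
--     # Pass 1: index each normalized form by its first occurrence (position, name).
--     first = {}
--     for i, name in enumerate(names):
--         first.setdefault(name.replace(" ", ""), (i, name))
--     # Pass 2: every name that is not the first occurrence of its form maps to that first name.
--     result = {}
--     for i, name in enumerate(names):
--         idx, orig = first[name.replace(" ", "")]
--         if idx != i:
--             result[name] = orig
--     return result
-- ===== Notes on version B (the rewrite author's own statement) =====
-- stated objective: alternative
-- what changed: B replaces A's single loop that decides duplicates inline while growing the normalized map by two separate passes: pass 1 builds an index mapping each normalized form to its first occurrence (position, name); pass 2 emits every name whose position is not the first occurrence of its form.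
import Mathlib
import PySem

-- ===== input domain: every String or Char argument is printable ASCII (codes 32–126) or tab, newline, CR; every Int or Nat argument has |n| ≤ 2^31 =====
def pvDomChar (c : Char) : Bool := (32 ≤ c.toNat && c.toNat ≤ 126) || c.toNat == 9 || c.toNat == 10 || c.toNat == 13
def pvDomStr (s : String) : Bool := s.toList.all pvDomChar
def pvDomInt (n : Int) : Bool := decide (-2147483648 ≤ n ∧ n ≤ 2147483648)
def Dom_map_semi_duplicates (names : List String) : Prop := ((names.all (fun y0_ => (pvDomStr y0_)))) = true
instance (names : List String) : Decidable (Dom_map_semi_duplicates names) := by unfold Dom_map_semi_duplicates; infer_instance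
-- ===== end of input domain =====

-- B re-implements A as two separate passes (first-occurrence index, then duplicate emission)
-- instead of A's single inline-decision loop; return values agree on all inputs.


-- ===== PORT A =====
-- one iteration of A's loop over the state (normalized_map, duplicates)
def mapSemiStepA (st : PySem.Dict String String × PySem.Dict String String) (name : String) :
    PySem.Dict String String × PySem.Dict String String :=
  let normalized := PySem.Str.replace name " " ""
  match st.1.get? normalized with
  | some first => (st.1, st.2.insert name first)   -- 'normalized in normalized_map': duplicates[name] = normalized_map[normalized]
  | none => (st.1.insert normalized name, st.2)

def map_semi_duplicates (names : List String) : List (String × String) :=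
  (names.foldl mapSemiStepA (PySem.Dict.empty, PySem.Dict.empty)).2.items

-- ===== PORT B =====
-- pass 1 of Source B: first.setdefault(name.replace(" ", ""), (i, name)) over enumerate(names)
def mapAltFirst (names : List String) : PySem.Dict String (Int × String) :=
  (PySem.List.enumerate names 0).foldl
    (fun d p => d.setdefault (PySem.Str.replace p.2 " " "") p) PySem.Dict.empty

-- one iteration of Source B's pass 2: first[key] is always present (pass 1 saw every key),
-- so the 'none' branch (Python's KeyError) is unreachable
def mapAltStepB (first : PySem.Dict String (Int × String))
    (r : PySem.Dict String String) (p : Int × String) : PySem.Dict String String :=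
  match first.get? (PySem.Str.replace p.2 " " "") with
  | some io => if io.1 ≠ p.1 then r.insert p.2 io.2 else r
  | none => r

def map_semi_duplicates_alt (names : List String) : List (String × String) :=
  let first := mapAltFirst names
  ((PySem.List.enumerate names 0).foldl (mapAltStepB first) PySem.Dict.empty).items

-- ===== PRECONDITION & SPEC =====
def Spec_map_semi_duplicates (names : List String) (out : List (String × String)) : Prop := out = map_semi_duplicates_alt names
instance (names : List String) (out : List (String × String)) : Decidable (Spec_map_semi_duplicates names out) := by unfold Spec_map_semi_duplicates; infer_instance

-- ===== CLAIM (what is proved, stated in full; the proofs are below) =====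
def Claim_equal_map_semi_duplicates : Prop := ∀ (names : List String), Dom_map_semi_duplicates names → Spec_map_semi_duplicates names (map_semi_duplicates names)

-- ===== LEMMAS AND PROOFS =====

-- first occurrence of normalized form k in l, positions counted from n
def firstOcc (l : List String) (n : Int) (k : String) : Option (Int × String) :=
  match l with
  | [] => none
  | x :: xs => if PySem.Str.replace x " " "" = k then some (n, x) else firstOcc xs (n + 1) k

theorem firstOcc_bounds {l : List String} {n i : Int} {k w : String}
    (h : firstOcc l n k = some (i, w)) : n ≤ i ∧ i < n + l.length := by
  induction l generalizing n with
  | nil => simp [firstOcc] at h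
  | cons x xs ih =>
    simp only [firstOcc] at h
    split at h
    · cases h; simp
    · have := ih h; simp; omega

theorem firstOcc_append (a b : List String) (n : Int) (k : String) :
    firstOcc (a ++ b) n k = (firstOcc a n k).or (firstOcc b (n + a.length) k) := by
  induction a generalizing n with
  | nil => simp [firstOcc]
  | cons x xs ih =>
    simp only [List.cons_append, firstOcc]
    split
    · rfl
    · simp only [List.length_cons]
      rw [ih]
      have hcast : n + 1 + (xs.length : Int) = n + ((xs.length + 1 : Nat) : Int) := by
        push_cast; ring
      rw [hcast]

-- pass 1 of B computes exactly firstOcc (as a pointwise lookup fact)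
theorem firstPass_get (l : List String) (n : Int) (d : PySem.Dict String (Int × String)) (k : String) :
    ((PySem.List.enumerate l n).foldl
      (fun d p => d.setdefault (PySem.Str.replace p.2 " " "") p) d).get? k
      = (d.get? k).or (firstOcc l n k) := by
  induction l generalizing n d with
  | nil => simp [PySem.List.enumerate_nil, firstOcc]
  | cons x xs ih =>
    rw [PySem.List.enumerate_cons, List.foldl_cons, ih]
    by_cases hk : PySem.Str.replace x " " "" = k
    · subst hk
      rw [show ((n, x) : Int × String).2 = x from rfl,
        PySem.Dict.get?_setdefault_self d (PySem.Str.replace x " " "") (n, x)]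
      simp only [firstOcc, if_pos]
      cases d.get? (PySem.Str.replace x " " "") <;> simp
    · rw [show ((n, x) : Int × String).2 = x from rfl,
        PySem.Dict.get?_setdefault_of_ne d (n, x) (Ne.symm hk)]
      simp only [firstOcc, if_neg hk]

-- uniqueness of the position: only x's normalized form has first occurrence at index pre.length
theorem firstOcc_at_self {pre : List String} {x : String} {xs : List String} {k w : String}
    (h : firstOcc (pre ++ x :: xs) 0 k = some ((pre.length : Int), w)) :
    k = PySem.Str.replace x " " "" ∧ w = x := by
  rw [firstOcc_append] at h
  rcases hp : firstOcc pre 0 k with _ | ⟨i, v⟩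
  · rw [hp] at h; simp only [Option.none_or] at h
    simp only [zero_add, firstOcc] at h
    split at h
    · next hkey => cases h; exact ⟨hkey.symm, rfl⟩
    · have := firstOcc_bounds h; omega
  · rw [hp] at h; simp only [Option.some_or] at h
    cases h; have := firstOcc_bounds hp; omega

-- x's own normalized form does occur in pre ++ x :: xs
theorem firstOcc_self_isSome (pre : List String) (x : String) (xs : List String) :
    ∃ i w, firstOcc (pre ++ x :: xs) 0 (PySem.Str.replace x " " "") = some (i, w) := by
  rw [firstOcc_append]
  rcases hp : firstOcc pre 0 (PySem.Str.replace x " " "") with _ | ⟨i, v⟩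
  · exact ⟨(pre.length : Int), x, by simp [firstOcc]⟩
  · exact ⟨i, v, by simp⟩

-- main invariant: A's remaining loop agrees with B's remaining pass-2 loop
theorem main_inv (l pre : List String) (F : PySem.Dict String (Int × String))
    (nm dup : PySem.Dict String String)
    (hF : ∀ k, F.get? k = firstOcc (pre ++ l) 0 k)
    (hnm : ∀ k, nm.get? k = (firstOcc (pre ++ l) 0 k).bind
        (fun p => if p.1 < (pre.length : Int) then some p.2 else none)) :
    (l.foldl mapSemiStepA (nm, dup)).2
      = (PySem.List.enumerate l (pre.length : Int)).foldl (mapAltStepB F) dup := by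
  induction l generalizing pre nm dup with
  | nil => simp [PySem.List.enumerate_nil]
  | cons x xs ih =>
    rw [PySem.List.enumerate_cons, List.foldl_cons, List.foldl_cons]
    have hassoc : pre ++ x :: xs = (pre ++ [x]) ++ xs := by simp
    have hlen : (((pre ++ [x]).length : Nat) : Int) = (pre.length : Int) + 1 := by simp
    have hkx := hnm (PySem.Str.replace x " " "")
    obtain ⟨i, w, hfo⟩ := firstOcc_self_isSome pre x xs
    rw [hfo] at hkx
    simp only [Option.bind_some] at hkx
    by_cases hi : i < (pre.length : Int)
    · -- normalized form seen before: A records a duplicate, B's index test fires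
      rw [if_pos hi] at hkx
      have hA : mapSemiStepA (nm, dup) x = (nm, dup.insert x w) := by
        simp [mapSemiStepA, hkx]
      have hB : mapAltStepB F dup ((pre.length : Int), x) = dup.insert x w := by
        simp only [mapAltStepB, hF, hfo]
        rw [if_pos (by omega)]
      rw [hA, hB]
      have h2 := ih (pre ++ [x]) nm (dup.insert x w)
        (fun k => by rw [hF k, hassoc])
        (fun k => by
          rw [← hassoc, hlen, hnm k]
          rcases hk2 : firstOcc (pre ++ x :: xs) 0 k with _ | ⟨j, v⟩
          · rfl
          · simp only [Option.bind_some]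
            by_cases hj : j = (pre.length : Int)
            · exfalso
              have h3 := firstOcc_at_self (pre := pre) (x := x) (xs := xs) (k := k) (w := v)
                (hj ▸ hk2)
              rw [h3.1, hfo] at hk2
              cases hk2; omega
            · by_cases hlt : j < (pre.length : Int)
              · rw [if_pos hlt, if_pos (by omega)]
              · rw [if_neg hlt, if_neg (by omega)])
      rw [hlen] at h2
      exact h2
    · -- x is the first occurrence of its form: A stores it, B skips it
      rw [if_neg hi] at hkx
      have hself : i = (pre.length : Int) ∧ w = x := by
        rw [firstOcc_append] at hfo
        rcases hp : firstOcc pre 0 (PySem.Str.replace x " " "") with _ | ⟨i', v⟩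
        · rw [hp] at hfo; simp only [Option.none_or] at hfo
          simp only [zero_add, firstOcc] at hfo
          cases hfo; exact ⟨rfl, rfl⟩
        · rw [hp] at hfo; simp only [Option.some_or] at hfo
          cases hfo; have := firstOcc_bounds hp; omega
      obtain ⟨hi0, hw⟩ := hself
      subst hi0
      rw [hw] at hfo
      have hA : mapSemiStepA (nm, dup) x = (nm.insert (PySem.Str.replace x " " "") x, dup) := by
        simp [mapSemiStepA, hkx]
      have hB : mapAltStepB F dup ((pre.length : Int), x) = dup := by
        simp only [mapAltStepB, hF, hfo]
        rw [if_neg (by simp)]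
      rw [hA, hB]
      have h2 := ih (pre ++ [x]) (nm.insert (PySem.Str.replace x " " "") x) dup
        (fun k => by rw [hF k, hassoc])
        (fun k => by
          rw [← hassoc, hlen]
          by_cases hk : k = PySem.Str.replace x " " ""
          · subst hk
            rw [PySem.Dict.get?_insert_self, hfo]
            simp only [Option.bind_some]
            rw [if_pos (by omega)]
          · rw [PySem.Dict.get?_insert_of_ne nm x hk, hnm k]
            rcases hk2 : firstOcc (pre ++ x :: xs) 0 k with _ | ⟨j, v⟩
            · rfl
            · simp only [Option.bind_some]
              by_cases hj : j = (pre.length : Int)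
              · exfalso
                have h3 := firstOcc_at_self (pre := pre) (x := x) (xs := xs) (k := k) (w := v)
                  (hj ▸ hk2)
                exact hk h3.1
              · by_cases hlt : j < (pre.length : Int)
                · rw [if_pos hlt, if_pos (by omega)]
                · rw [if_neg hlt, if_neg (by omega)])
      rw [hlen] at h2
      exact h2

-- ===== VERDICT (by name: the statement is the Claim_ definition above) =====
theorem map_semi_duplicates_spec : Claim_equal_map_semi_duplicates := by
  intro names _
  show map_semi_duplicates names = map_semi_duplicates_alt names
  unfold map_semi_duplicates map_semi_duplicates_alt
  have h := main_inv names [] (mapAltFirst names) PySem.Dict.empty PySem.Dict.empty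
    (fun k => by
      unfold mapAltFirst
      rw [firstPass_get]
      simp [PySem.Dict.get?_empty])
    (fun k => by
      rcases hk : firstOcc names 0 k with _ | ⟨i, w⟩
      · simp [PySem.Dict.get?_empty, hk]
      · have := firstOcc_bounds hk
        simp [PySem.Dict.get?_empty, hk]
        omega)
  simp only [List.length_nil, Nat.cast_zero] at h
  rw [h]
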